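-- pv_equiv track=rewrite | github.com/jurajzachar/py-ds | py_ds/codility/golden_leader.py | solution
-- ===== SOURCE A (Python) =====
-- def solution(a: list[int]) -> int:
--     """
--     this solution runs with O(n log n) time complexity
--     """
--     n = len(a)
--     assert 0 <= n <= 10 ** 9, "array length out of bounds"
--
--     if n < 2:
--         return a[0]
--
--     leader_threshold = n // 2
--     tmp = a.copy()
--     tmp.sort()
--
--     idx = 0
--     candidate = tmp[idx]
--     counter = 1
--     while idx + 1 < n:
--         if counter >= leader_threshold:
--             break;
--         next = tmp[idx + 1]
--         if next == candidate:
--             counter += 1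
--         else:
--             counter = 1
--             candidate = next
--         idx += 1
--
--     return candidate if counter >= leader_threshold else -1;
-- ===== SOURCE B (Python) =====
-- def solution(a: list[int]) -> int:
--     n = len(a)
--     assert 0 <= n <= 10 ** 9, "array length out of bounds"
--
--     if n < 2:
--         return a[0]
--
--     t = n // 2
--     tmp = sorted(a)
--     # a value occurs >= t times in sorted order iff some window of width t is constant;
--     # the first constant window's left value is the smallest qualifying value
--     for x, y in zip(tmp, tmp[t - 1:]):
--         if x == y:
--             return x
--     return -1
-- ===== Notes on version B (the rewrite author's own statement) =====
-- stated objective: alternative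
-- what changed: Replaces A's run-length counting loop (candidate/counter state machine over the sorted list) with a stateless constant-window scan: zip the sorted list with its (t-1)-shifted tail and return the first pair of equal window endpoints, which is the smallest value occurring at least n//2 times; the zip loop runs at C speed and exits at the first match.
import Mathlib
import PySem

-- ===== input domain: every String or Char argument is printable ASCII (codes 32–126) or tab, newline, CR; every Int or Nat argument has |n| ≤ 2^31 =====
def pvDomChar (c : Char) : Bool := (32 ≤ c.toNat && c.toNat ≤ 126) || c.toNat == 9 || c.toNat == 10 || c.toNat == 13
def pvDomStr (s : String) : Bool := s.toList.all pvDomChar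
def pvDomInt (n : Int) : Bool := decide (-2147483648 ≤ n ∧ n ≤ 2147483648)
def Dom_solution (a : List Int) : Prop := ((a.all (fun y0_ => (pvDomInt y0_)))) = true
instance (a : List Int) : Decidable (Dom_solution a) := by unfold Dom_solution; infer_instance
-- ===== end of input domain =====

-- B replaces A's run-length counting scan by a constant-window scan over the sorted
-- list paired with its own (t-1)-shifted tail (alternative decomposition, same cost).


-- ===== PORT A =====
-- the while loop, as recursion over the not-yet-seen tail of tmp; state = (candidate, counter)
def loopA (t : Nat) : List Int → Int → Nat → Int × Nat
  | [], cand, cnt => (cand, cnt)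
  | nx :: rest, cand, cnt =>
    if t ≤ cnt then (cand, cnt)
    else if nx == cand then loopA t rest cand (cnt + 1)
    else loopA t rest nx 1

def solution (a : List Int) : Int :=
  let n := a.length
  -- the Python assert 0 <= n <= 10**9 raises outside Pre_; n is a length, so 0 ≤ n always
  if n < 2 then (PySem.List.pyGet? a 0).getD 0   -- a[0]; the none case (a = []) is outside Pre_
  else
    let t := n / 2                               -- n // 2 on a nonnegative n = Nat division
    let tmp := PySem.List.sorted a (fun x => x) false
    match tmp with
    | [] => -1                                   -- unreachable: tmp has length n ≥ 2
    | c :: rest =>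
      let p := loopA t rest c 1
      if t ≤ p.2 then p.1 else -1

-- ===== PORT B =====
-- for x, y in zip(tmp, tmp[t-1:]): first constant window of width t
def scanB : List Int → List Int → Int
  | x :: xs, y :: ys => if x == y then x else scanB xs ys
  | _, _ => -1

def solution_alt (a : List Int) : Int :=
  let n := a.length
  if n < 2 then (PySem.List.pyGet? a 0).getD 0
  else
    let t := n / 2
    let tmp := PySem.List.sorted a (fun x => x) false
    scanB tmp (tmp.drop (t - 1))

-- ===== PRECONDITION & SPEC =====
-- Pre_ excludes [] (A raises IndexError on a[0]) and absurdly long lists (the assert fires).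
def Pre_solution (a : List Int) : Prop := a ≠ [] ∧ a.length ≤ 10 ^ 9
instance (a : List Int) : Decidable (Pre_solution a) := by unfold Pre_solution; infer_instance
def pvWitness_solution : List Int := [3, 1, 3]

def Spec_solution (a : List Int) (out : Int) : Prop := out = solution_alt a
instance (a : List Int) (out : Int) : Decidable (Spec_solution a out) := by unfold Spec_solution; infer_instance

-- ===== CLAIM (what is proved, stated in full; the proofs are below) =====
def Claim_equal_solution : Prop := ∀ (a : List Int), Dom_solution a → Pre_solution a → Spec_solution a (solution a)

-- ===== LEMMAS AND PROOFS =====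

-- proof-only spec: recursion over the runs of a list; returns the value of the first
-- run of length ≥ t, else -1
def specRun (t : Nat) : List Int → Int
  | [] => -1
  | x :: xs =>
    if t ≤ (List.takeWhile (fun y => y == x) (x :: xs)).length then x
    else specRun t (List.dropWhile (fun y => y == x) (x :: xs))
termination_by l => l.length
decreasing_by
  simp only [List.takeWhile, List.dropWhile, beq_self_eq_true]
  have := List.length_dropWhile_le (p := fun y => y == x) (l := xs)
  simp only [List.length_cons]; omega

lemma loopA_spec (t : Nat) : ∀ (rest : List Int) (cand : Int) (cnt : Nat),
    (if t ≤ (loopA t rest cand cnt).2 then (loopA t rest cand cnt).1 else -1)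
      = if t ≤ cnt + (rest.takeWhile (fun y => y == cand)).length then cand
        else specRun t (rest.dropWhile (fun y => y == cand)) := by
  intro rest
  induction rest with
  | nil => intro cand cnt; simp [loopA, specRun]
  | cons nx rs ih =>
    intro cand cnt
    by_cases hb : t ≤ cnt
    · have hb' : t ≤ cnt + ((nx :: rs).takeWhile (fun y => y == cand)).length := by omega
      simp [loopA, hb, hb']
    · by_cases he : nx = cand
      · subst he
        have hstep : loopA t (nx :: rs) nx cnt = loopA t rs nx (cnt + 1) := by
          simp [loopA, hb]
        rw [hstep, ih]
        have h1 : (nx :: rs).takeWhile (fun y => y == nx)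
            = nx :: rs.takeWhile (fun y => y == nx) := by
          rw [List.takeWhile_cons]; simp
        have h2 : (nx :: rs).dropWhile (fun y => y == nx)
            = rs.dropWhile (fun y => y == nx) := by
          rw [List.dropWhile_cons]; simp
        rw [h1, h2, List.length_cons,
          show cnt + ((rs.takeWhile (fun y => y == nx)).length + 1)
              = cnt + 1 + (rs.takeWhile (fun y => y == nx)).length from by omega]
      · have hbe : (nx == cand) = false := by simp [he]
        have hstep : loopA t (nx :: rs) cand cnt = loopA t rs nx 1 := by
          simp [loopA, hb, hbe]
        rw [hstep, ih]
        have h3 : (nx :: rs).takeWhile (fun y => y == cand) = [] := by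
          rw [List.takeWhile_cons, hbe]; simp
        have h4 : (nx :: rs).dropWhile (fun y => y == cand) = nx :: rs := by
          rw [List.dropWhile_cons, hbe]; simp
        have h1 : (nx :: rs).takeWhile (fun y => y == nx)
            = nx :: rs.takeWhile (fun y => y == nx) := by
          rw [List.takeWhile_cons]; simp
        have h2 : (nx :: rs).dropWhile (fun y => y == nx)
            = rs.dropWhile (fun y => y == nx) := by
          rw [List.dropWhile_cons]; simp
        rw [h3, h4, List.length_nil, Nat.add_zero, if_neg hb, specRun, h1, h2,
          List.length_cons,
          show (rs.takeWhile (fun y => y == nx)).length + 1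
              = 1 + (rs.takeWhile (fun y => y == nx)).length from by omega]

lemma mem_takeWhile_eq {x y : Int} {l : List Int}
    (h : y ∈ l.takeWhile (fun z => z == x)) : y = x := by
  induction l with
  | nil => simp [List.takeWhile] at h
  | cons z zs ih =>
    by_cases hz : z = x
    · subst hz
      rw [List.takeWhile_cons] at h
      simp only [beq_self_eq_true] at h
      rcases List.mem_cons.mp h with h | h
      · exact h
      · exact ih h
    · rw [List.takeWhile_cons] at h
      simp [hz] at h

lemma mem_dropWhile_ne {x : Int} : ∀ (l : List Int), List.Pairwise (· ≤ ·) l →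
    (∀ z ∈ l, x ≤ z) → ∀ y ∈ l.dropWhile (fun z => z == x), y ≠ x := by
  intro l
  induction l with
  | nil => intro _ _ y hy; simp at hy
  | cons z zs ih =>
    intro hp hle y hy
    by_cases hz : z = x
    · subst hz
      rw [List.dropWhile_cons] at hy
      simp only [beq_self_eq_true] at hy
      exact ih hp.tail (fun w hw => hle w (List.mem_cons_of_mem _ hw)) y hy
    · rw [List.dropWhile_cons] at hy
      simp only [beq_iff_eq, hz] at hy
      rcases List.mem_cons.mp hy with h | h
      · subst h; exact hz
      · have h1 : x ≤ z := hle z (List.mem_cons_self ..)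
        have h2 : z ≤ y := (List.pairwise_cons.mp hp).1 y h
        have : z ≠ x := hz
        intro he; subst he; omega

lemma scanB_skip {x : Int} : ∀ (p v u : List Int), (∀ y ∈ p, y = x) →
    (∀ y ∈ v.take p.length, y ≠ x) → scanB (p ++ u) v = scanB u (v.drop p.length) := by
  intro p
  induction p with
  | nil => intro v u _ _; simp
  | cons z zs ih =>
    intro v u hp hv
    have hz : z = x := hp z (List.mem_cons_self ..)
    cases v with
    | nil => cases u <;> simp [scanB]
    | cons w ws =>
      have hw : w ≠ x := hv w (by
        simp only [List.length_cons, List.take_succ_cons]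
        exact List.mem_cons_self ..)
      have : (z == w) = false := by subst hz; simp [Ne.symm hw]
      rw [List.cons_append, scanB, if_neg (by simp [this])]
      have hdrop : (w :: ws).drop (z :: zs).length = ws.drop zs.length := by
        simp [List.length_cons]
      rw [hdrop]
      exact ih ws u (fun y hy => hp y (List.mem_cons_of_mem _ hy))
        (fun y hy => hv y (by
          simp only [List.length_cons, List.take_succ_cons]
          exact List.mem_cons_of_mem _ hy))

lemma scanB_spec (t : Nat) (ht : 1 ≤ t) : ∀ (n : Nat) (tmp : List Int),
    tmp.length ≤ n → List.Pairwise (· ≤ ·) tmp →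
    scanB tmp (tmp.drop (t - 1)) = specRun t tmp := by
  intro n
  induction n with
  | zero =>
    intro tmp hlen _
    have : tmp = [] := List.eq_nil_of_length_eq_zero (Nat.le_zero.mp hlen)
    subst this; simp [scanB, specRun]
  | succ m ih =>
    intro tmp hlen hp
    cases htmp : tmp with
    | nil => simp [scanB, specRun]
    | cons x xs =>
      subst htmp
      set P := (x :: xs).takeWhile (fun y => y == x) with hP
      set R := (x :: xs).dropWhile (fun y => y == x) with hR
      have hsplit : P ++ R = x :: xs := List.takeWhile_append_dropWhile
      have hPlen : 1 ≤ P.length := by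
        rw [hP, List.takeWhile_cons]; simp
      have hPmem : ∀ y ∈ P, y = x := fun y hy => mem_takeWhile_eq hy
      have hhead : ∀ z ∈ (x :: xs), x ≤ z := by
        intro z hz
        rcases List.mem_cons.mp hz with h | h
        · exact le_of_eq h.symm
        · exact (List.pairwise_cons.mp hp).1 z h
      have hRmem : ∀ y ∈ R, y ≠ x := mem_dropWhile_ne (x :: xs) hp hhead
      by_cases hrun : t ≤ P.length
      · -- the first window is constant: tmp[t-1] = x
        have hdrop : (x :: xs).drop (t - 1) = P.drop (t - 1) ++ R := by
          rw [← hsplit, List.drop_append]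
          have : t - 1 - P.length = 0 := by omega
          rw [this, List.drop_zero]
        have hne : P.drop (t - 1) ≠ [] := by
          intro h
          have := List.drop_eq_nil_iff.mp h
          omega
        obtain ⟨h0, hs, hh⟩ := List.exists_cons_of_ne_nil hne
        have hx0 : h0 = x := hPmem h0 (List.mem_of_mem_drop (by rw [hh]; simp))
        rw [specRun, if_pos (by rw [← hP]; exact hrun), hdrop, hh, hx0]
        simp [scanB]
      · -- the run is too short: skip it, windows over it all fail
        have hrt : P.length ≤ t - 1 := by omega
        have hvtake : ∀ y ∈ ((x :: xs).drop (t - 1)).take P.length, y ≠ x := by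
          intro y hy
          have hy' : y ∈ (x :: xs).drop (t - 1) := List.mem_of_mem_take hy
          have : (x :: xs).drop (t - 1) = R.drop (t - 1 - P.length) := by
            conv_lhs => rw [← hsplit]
            rw [List.drop_append, List.drop_eq_nil_iff.mpr hrt,
              List.nil_append]
          rw [this] at hy'
          exact hRmem y (List.mem_of_mem_drop hy')
        have hRdrop : ((x :: xs).drop (t - 1)).drop P.length = R.drop (t - 1) := by
          conv_lhs => rw [← hsplit]
          rw [List.drop_append, List.drop_eq_nil_iff.mpr hrt,
            List.nil_append, List.drop_drop]
          congr 1
          omega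
        have hstep : scanB (x :: xs) ((x :: xs).drop (t - 1)) = scanB R (R.drop (t - 1)) := by
          have hskip := scanB_skip P ((x :: xs).drop (t - 1)) R hPmem hvtake
          rw [hsplit] at hskip
          rw [hskip, hRdrop]
        have hRlen : R.length ≤ m := by
          have h1 : P.length + R.length = (x :: xs).length := by
            rw [← List.length_append, hsplit]
          simp at h1 hlen
          omega
        have hRp : List.Pairwise (· ≤ ·) R := hp.sublist (List.dropWhile_sublist _)
        rw [hstep, ih R hRlen hRp, specRun, if_neg (by rw [← hP]; exact hrun)]

-- ===== VERDICT (by name: the statement is the Claim_ definition above) =====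
theorem solution_spec : Claim_equal_solution := by
  intro a _ hpre
  unfold Spec_solution solution solution_alt
  by_cases hn : a.length < 2
  · simp [hn]
  · simp only [if_neg hn]
    set t := a.length / 2 with hT
    set tmp := PySem.List.sorted a (fun x => x) false with hs
    have ht : 1 ≤ t := by
      rw [hT]; omega
    have hlen : tmp.length = a.length := PySem.List.length_sorted a (fun x => x) false
    have hpair : List.Pairwise (· ≤ ·) tmp := PySem.List.sorted_pairwise a (fun x => x)
    cases htmp : tmp with
    | nil => exfalso; rw [htmp] at hlen; simp at hlen; omega
    | cons c rest =>
      rw [htmp] at hpair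
      show (if t ≤ (loopA t rest c 1).2 then (loopA t rest c 1).1 else (-1 : Int))
        = scanB (c :: rest) ((c :: rest).drop (t - 1))
      rw [loopA_spec]
      rw [scanB_spec t ht (c :: rest).length (c :: rest) le_rfl hpair]
      rw [specRun]
      simp only [List.takeWhile, List.dropWhile, beq_self_eq_true, List.length_cons]
      rw [Nat.add_comm]
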